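-- pv_equiv track=rewrite | github.com/EugeneDyatl0v/AOIS | AOIS_6/table.py | check
-- ===== SOURCE A (Python) =====
-- def check(table):
--     checker = ['X'] * len(table[0])
--     for_check = [''] * len(table[0])
--     for obj in table:
--         for index, item in enumerate(obj):
--             if item == 'X' and for_check[index] == '':
--                 for_check[index] = 'X'
--     return checker == for_check
-- ===== SOURCE B (Python) =====
-- def check(table):
--     width = len(table[0])
--     return all(
--         any(i < len(row) and row[i] == 'X' for row in table)
--         for i in range(width)
--     )
-- ===== Notes on version B (the rewrite author's own statement) =====
-- stated objective: idiomatic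
-- what changed: Column-major all/any check that short-circuits on the first 'X' per column, instead of row-major construction of a per-column flag list compared against a list of 'X's.
import Mathlib
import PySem

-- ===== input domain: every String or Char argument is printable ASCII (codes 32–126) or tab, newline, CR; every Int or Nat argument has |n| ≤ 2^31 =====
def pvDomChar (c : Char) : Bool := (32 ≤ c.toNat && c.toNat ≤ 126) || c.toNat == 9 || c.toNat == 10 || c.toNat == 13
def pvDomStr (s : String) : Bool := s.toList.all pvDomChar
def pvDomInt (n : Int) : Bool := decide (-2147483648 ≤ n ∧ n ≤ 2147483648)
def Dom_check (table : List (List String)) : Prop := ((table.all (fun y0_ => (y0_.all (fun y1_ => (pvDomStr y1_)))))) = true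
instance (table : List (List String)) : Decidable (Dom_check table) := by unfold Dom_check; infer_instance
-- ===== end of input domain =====

-- B is the idiomatic column-major all/any check; return-value equivalence with A is proved on Pre_check.

-- ===== PORT A =====
-- inner loop of A: `for index, item in enumerate(obj): if item == 'X' and for_check[index] == '': for_check[index] = 'X'`
-- (the read for_check[index] happens in Python only when item == 'X'; Pre_check guarantees it is then in range,
--  so the out-of-range default "X" below is never the value Python would have read on admitted inputs)
def rowStep : List String → Nat → List String → List String
  | fc, _, [] => fc
  | fc, j, item :: rest =>
      rowStep (if item = "X" ∧ fc.getD j "X" = "" then fc.set j "X" else fc) (j + 1) rest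

def check (table : List (List String)) : Bool :=
  List.replicate (table.headD []).length "X"
    == table.foldl (fun fc obj => rowStep fc 0 obj) (List.replicate (table.headD []).length "")

-- ===== PORT B =====
def check_alt (table : List (List String)) : Bool :=
  (List.range (table.headD []).length).all (fun i =>
    table.any (fun row => decide (i < row.length) && (row.getD i "" == "X")))

-- ===== PRECONDITION & SPEC =====
-- Pre_ excludes exactly the inputs where Python A raises IndexError: the empty table (table[0])
-- and tables where some row holds an 'X' at an index ≥ len(table[0]) (the write for_check[index]).
def Pre_check (table : List (List String)) : Prop :=
  table ≠ [] ∧ ∀ row ∈ table, "X" ∉ row.drop (table.headD []).length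
instance (table : List (List String)) : Decidable (Pre_check table) := by unfold Pre_check; infer_instance
def pvWitness_check : List (List String) := [["X"]]

def Spec_check (table : List (List String)) (out : Bool) : Prop := out = check_alt table
instance (table : List (List String)) (out : Bool) : Decidable (Spec_check table out) := by unfold Spec_check; infer_instance

-- ===== CLAIM (what is proved, stated in full; the proofs are below) =====
def Claim_equal_check : Prop := ∀ (table : List (List String)), Dom_check table → Pre_check table → Spec_check table (check table)

-- ===== LEMMAS AND PROOFS =====
-- B's per-column predicate (the inner `any` body of check_alt)
def colX (row : List String) (i : Nat) : Bool := decide (i < row.length) && (row.getD i "" == "X")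

theorem rowStep_getElem? (obj fc : List String) (j i : Nat)
    (hv : ∀ t (_ : t < fc.length), fc[t] = "" ∨ fc[t] = "X") :
    (rowStep fc j obj)[i]? =
      if j ≤ i ∧ i < fc.length ∧ colX obj (i - j) then some "X" else fc[i]? := by
  induction obj generalizing fc j with
  | nil => simp [rowStep, colX]
  | cons a rest ih =>
      simp only [rowStep]
      have hv' : ∀ (t : Nat) (_ : t < (if a = "X" ∧ fc.getD j "X" = "" then fc.set j "X" else fc).length),
          (if a = "X" ∧ fc.getD j "X" = "" then fc.set j "X" else fc)[t] = "" ∨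
          (if a = "X" ∧ fc.getD j "X" = "" then fc.set j "X" else fc)[t] = "X" := by
        by_cases hc : a = "X" ∧ fc.getD j "X" = ""
        · simp only [if_pos hc]
          intro t ht
          rw [List.getElem_set]
          split
          · right; rfl
          · exact hv t (by simpa using ht)
        · simp only [if_neg hc]
          exact hv
      rw [ih _ (j+1) hv']
      by_cases hij : i = j
      · subst hij
        simp only [Nat.sub_self, Nat.add_one_le_iff, lt_irrefl, false_and, if_false]
        by_cases ha : a = "X"
        · by_cases hget : fc.getD i "X" = ""
          · have hjlen : i < fc.length := by
              by_contra h
              rw [List.getD_eq_default _ _ (by omega)] at hget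
              simp at hget
            rw [if_pos ⟨ha, hget⟩, if_pos ⟨le_refl i, hjlen, by simp [colX, ha]⟩]
            simp [hjlen]
          · rw [if_neg (by tauto)]
            by_cases hjlen : i < fc.length
            · have hX : fc[i] = "X" := by
                rcases hv i hjlen with h | h
                · exfalso; apply hget; rw [List.getD_eq_getElem _ _ hjlen]; exact h
                · exact h
              rw [if_pos ⟨le_refl i, hjlen, by simp [colX, ha]⟩]
              rw [List.getElem?_eq_getElem hjlen, hX]
            · rw [if_neg (by tauto)]
        · rw [if_neg (by tauto), if_neg (by simp [colX, List.getD, ha])]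
      · have hset : (if a = "X" ∧ fc.getD j "X" = "" then fc.set j "X" else fc)[i]? = fc[i]? := by
          split
          · exact List.getElem?_set_ne (by omega)
          · rfl
        have hlen : (if a = "X" ∧ fc.getD j "X" = "" then fc.set j "X" else fc).length = fc.length := by
          split <;> simp
        rw [hset, hlen]
        by_cases hle : j ≤ i
        · have hlt : j < i := lt_of_le_of_ne hle (Ne.symm hij)
          have h1 : i - (j+1) = i - j - 1 := by omega
          have h2 : colX (a :: rest) (i - j) = colX rest (i - j - 1) := by
            have hd : i - j = (i - j - 1) + 1 := by omega
            rw [hd]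
            simp [colX, List.getD]
          rw [h1, h2]
          have h3 : (j + 1 ≤ i) := by omega
          simp [h3, hle]
        · rw [if_neg (by omega), if_neg (by tauto)]

theorem rowStep_length (obj fc : List String) (j : Nat) :
    (rowStep fc j obj).length = fc.length := by
  induction obj generalizing fc j with
  | nil => rfl
  | cons a rest ih =>
      simp only [rowStep]
      rw [ih]
      split <;> simp

theorem rowStep_vals (obj fc : List String) (j : Nat)
    (hv : ∀ t (_ : t < fc.length), fc[t] = "" ∨ fc[t] = "X") :
    ∀ t (_ : t < (rowStep fc j obj).length),
      (rowStep fc j obj)[t] = "" ∨ (rowStep fc j obj)[t] = "X" := by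
  intro t ht
  have h := rowStep_getElem? obj fc j t hv
  rw [List.getElem?_eq_getElem ht] at h
  split at h
  · right; exact Option.some.inj h
  · have ht' : t < fc.length := by rwa [rowStep_length] at ht
    rw [List.getElem?_eq_getElem ht'] at h
    rw [Option.some.inj h]
    exact hv t ht'

theorem fold_getElem? (table : List (List String)) (fc : List String) (i : Nat)
    (hv : ∀ t (_ : t < fc.length), fc[t] = "" ∨ fc[t] = "X") :
    (table.foldl (fun fc obj => rowStep fc 0 obj) fc)[i]? =
      if i < fc.length ∧ table.any (fun row => colX row i) then some "X" else fc[i]? := by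
  induction table generalizing fc with
  | nil => simp
  | cons r rs ih =>
      simp only [List.foldl_cons]
      rw [ih (rowStep fc 0 r) (rowStep_vals r fc 0 hv), rowStep_length,
          rowStep_getElem? r fc 0 i hv]
      simp only [Nat.zero_le, true_and, Nat.sub_zero, List.any_cons]
      by_cases h1 : i < fc.length <;> by_cases h2 : colX r i <;> simp [h1, h2]
theorem check_eq (table : List (List String)) : check table = check_alt table := by
  unfold check check_alt
  set n := (table.headD []).length with hn
  have hv0 : ∀ t (_ : t < (List.replicate n ("" : String)).length),
      (List.replicate n ("" : String))[t] = "" ∨ (List.replicate n ("" : String))[t] = "X" := by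
    intro t ht; left; simp
  have hF := fun i => fold_getElem? table (List.replicate n "") i hv0
  simp only [List.length_replicate] at hF
  have hbeq : ∀ (l l' : List String), (l == l') = decide (l = l') := by
    intro l l'; by_cases h : l = l' <;> simp [h]
  rw [hbeq]
  show decide (List.replicate n "X" = table.foldl (fun fc obj => rowStep fc 0 obj) (List.replicate n ""))
      = (List.range n).all (fun i => table.any (fun row => colX row i))
  by_cases hall : ∀ i, i < n → table.any (fun row => colX row i) = true
  · have hEq : List.replicate n "X" = table.foldl (fun fc obj => rowStep fc 0 obj) (List.replicate n "") := by
      apply List.ext_getElem?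
      intro i
      rw [hF i, List.getElem?_replicate]
      by_cases hi : i < n
      · simp [hi, hall i hi]
      · simp [hi]
    rw [hEq]
    simp [List.all_eq_true, List.mem_range]
    intro i hi
    have := hall i hi
    simpa [List.any_eq_true] using this
  · push Not at hall
    obtain ⟨i, hi, hne⟩ := hall
    have hfalse : table.any (fun row => colX row i) = false := by
      simpa using hne
    have hNe : List.replicate n "X" ≠ table.foldl (fun fc obj => rowStep fc 0 obj) (List.replicate n "") := by
      intro hEq
      have := congrArg (fun l => l[i]?) hEq
      simp only at this
      rw [hF i, List.getElem?_replicate, if_pos hi, if_neg (by simp [hfalse]), List.getElem?_replicate, if_pos hi] at this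
      simp at this
    rw [decide_eq_false hNe]
    symm
    simp only [List.all_eq_false]  -- maybe: List.all_eq_false : l.all p = false ↔ ∃ x ∈ l, ¬ p x
    exact ⟨i, by simpa using hi, by simp [hfalse]⟩

-- ===== VERDICT (by name: the statement is the Claim_ definition above) =====
theorem check_spec : Claim_equal_check := by
  intro table _ _
  unfold Spec_check
  exact check_eq table
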